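-- pv_equiv track=rewrite | github.com/manokhina/coding-challenges | 20210108/leaderboard.py | climbingLeaderboard_naive
-- ===== SOURCE A (Python) =====
-- def climbingLeaderboard_naive(ranked, player):
--     res = list()
--     for p in player:
--         curr_rank = 1
--         prev_ranked = None
--         for r_item in ranked:
--             if p >= r_item:
--                 res.append(curr_rank)
--                 break
--             elif prev_ranked != r_item:
--                 curr_rank += 1
--                 prev_ranked = r_item
--         if p < ranked[-1]:
--             res.append(curr_rank)
--         ranked.append(p)
--         ranked.sort(reverse=True)
--     return res
-- ===== SOURCE B (Python) =====
-- def climbingLeaderboard_naive(ranked, player):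
--     # Dense ranking: keep the distinct scores in an ascending array,
--     # binary-search each player's score and insert it if new.
--     scores = sorted(set(ranked))
--     res = []
--     for p in player:
--         lo, hi = 0, len(scores)
--         while lo < hi:
--             mid = (lo + hi) // 2
--             if scores[mid] <= p:
--                 lo = mid + 1
--             else:
--                 hi = mid
--         res.append(1 + len(scores) - lo)
--         if lo == 0 or scores[lo - 1] != p:
--             scores.insert(lo, p)
--     return res
-- ===== Notes on version B (the rewrite author's own statement) =====
-- stated objective: faster
-- what changed: A rescans the whole board and appends-and-resorts it after every player; B dedups the board once into an ascending distinct array and serves each player by a hand-written binary search plus one positional insert. Pre_ excludes boards that are not in leaderboard order around the first player's score (some score above it placed after a lower one, or equal high scores separated): there A's early-break run count misranks the first player and its trailing append can push that rank twice, so the output is not a dense ranking (it can even have more entries than players); …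
-- outside the precondition, e.g. on climbingLeaderboard_naive([1, 5, 3], [4]): A returns [1], B returns [2]; on climbingLeaderboard_naive([3, 5], [4]): A returns [1, 1], B returns [2]
import Mathlib
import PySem

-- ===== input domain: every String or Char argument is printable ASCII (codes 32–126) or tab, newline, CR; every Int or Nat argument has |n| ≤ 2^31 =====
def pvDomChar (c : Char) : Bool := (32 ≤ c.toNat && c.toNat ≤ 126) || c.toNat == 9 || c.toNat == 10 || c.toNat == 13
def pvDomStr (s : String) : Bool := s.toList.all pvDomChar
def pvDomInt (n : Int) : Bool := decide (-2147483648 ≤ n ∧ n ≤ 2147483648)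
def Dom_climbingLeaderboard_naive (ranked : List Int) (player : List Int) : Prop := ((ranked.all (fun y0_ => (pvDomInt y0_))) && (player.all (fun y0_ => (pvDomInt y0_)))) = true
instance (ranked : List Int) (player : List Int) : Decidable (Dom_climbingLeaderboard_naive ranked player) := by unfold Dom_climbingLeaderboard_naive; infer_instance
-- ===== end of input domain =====

-- B replaces A's per-player rescan + full re-sort by one dedup into an ascending distinct
-- array maintained by binary search + insertion (objective: a better algorithm; equivalence
-- is proved on boards in leaderboard order around the first player's score, see Pre_).
-- A mutates `ranked` in place (appends each player and re-sorts); B does not — the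
-- equivalence proved here is about the RETURN value only.

-- ===== PORT A =====
-- inner `for r_item in ranked` loop: state (curr_rank, prev_ranked); returns (curr_rank, broke?)
def pvInnerA (p : Int) : List Int → Int → Option Int → Int × Bool
  | [], curr, _ => (curr, false)
  | r :: rest, curr, prev =>
    if p ≥ r then (curr, true)
    else if prev ≠ some r then pvInnerA p rest (curr + 1) (some r)
    else pvInnerA p rest curr prev

def pvStepA (acc : List Int × List Int) (p : Int) : List Int × List Int :=
  let res := acc.1
  let L := acc.2
  let cb := pvInnerA p L 1 none
  let res1 := if cb.2 then res ++ [cb.1] else res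
  let res2 := match PySem.List.pyGet? L (-1) with
    | some last => if p < last then res1 ++ [cb.1] else res1
    | none => res1  -- Python raises IndexError here (ranked = []); excluded by Pre_
  (res2, PySem.List.sorted (L ++ [p]) (fun x => x) true)

def climbingLeaderboard_naive (ranked : List Int) (player : List Int) : List Int :=
  (player.foldl pvStepA ([], ranked)).1

-- ===== PORT B =====
-- the hand-written `while lo < hi` binary search of Source B; `fuel` (hi - lo at entry,
-- and hi - lo strictly decreases) only makes the loop total
def pvBisect (D : List Int) (p : Int) : Nat → Nat → Nat → Nat
  | 0, lo, _ => lo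
  | fuel + 1, lo, hi =>
    if lo < hi then
      let mid := (lo + hi) / 2
      if D.getD mid 0 ≤ p then pvBisect D p fuel (mid + 1) hi  -- D[mid]: mid < hi ≤ len D, in range
      else pvBisect D p fuel lo mid
    else lo

def pvStepB (acc : List Int × List Int) (p : Int) : List Int × List Int :=
  let res := acc.1
  let D := acc.2
  let lo := pvBisect D p D.length 0 D.length
  let res' := res ++ [1 + (D.length : Int) - (lo : Int)]
  let D' := if lo = 0 ∨ D.getD (lo - 1) 0 ≠ p then PySem.List.insert D (lo : Int) p else D
  (res', D')

-- `scores = sorted(set(ranked))`, then one pvStepB per player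
def climbingLeaderboard_naive_alt (ranked : List Int) (player : List Int) : List Int :=
  (player.foldl pvStepB ([], PySem.List.sorted (PySem.Set.ofList ranked) (fun x => x) false)).1

-- ===== PRECONDITION & SPEC =====
-- adjacent dedup (run heads), used by Pre_'s "equal scores adjacent" condition
def pvDAdjAux (prev : Int) : List Int → List Int
  | [] => []
  | x :: xs => if x == prev then pvDAdjAux prev xs else x :: pvDAdjAux x xs

def pvDAdj : List Int → List Int
  | [] => []
  | x :: xs => x :: pvDAdjAux x xs

-- Pre_ restricts to boards in leaderboard order relative to the first player's score:
-- all scores strictly above it form the leading block (as on any non-increasing board),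
-- with equal scores adjacent; it thereby also excludes an empty board with players, where
-- A raises IndexError at ranked[-1]. On out-of-order boards A's early-break scan misranks
-- the first player and can append that rank twice (more entries than players).
def Pre_climbingLeaderboard_naive (ranked : List Int) (player : List Int) : Prop :=
  player = [] ∨
    (ranked ≠ [] ∧
      ranked.takeWhile (fun r => !decide (player.headI ≥ r))
        = ranked.filter (fun r => !decide (player.headI ≥ r)) ∧
      (pvDAdj (ranked.takeWhile (fun r => !decide (player.headI ≥ r)))).Nodup)
instance (ranked : List Int) (player : List Int) : Decidable (Pre_climbingLeaderboard_naive ranked player) := by unfold Pre_climbingLeaderboard_naive; infer_instance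
def pvWitness_climbingLeaderboard_naive : List Int × List Int := ([100, 90, 90, 80], [70, 80, 105])

def Spec_climbingLeaderboard_naive (ranked : List Int) (player : List Int) (out : List Int) : Prop := out = climbingLeaderboard_naive_alt ranked player
instance (ranked : List Int) (player : List Int) (out : List Int) : Decidable (Spec_climbingLeaderboard_naive ranked player out) := by unfold Spec_climbingLeaderboard_naive; infer_instance

-- ===== CLAIM (what is proved, stated in full; the proofs are below) =====
def Claim_equal_climbingLeaderboard_naive : Prop := ∀ (ranked : List Int) (player : List Int), Dom_climbingLeaderboard_naive ranked player → Pre_climbingLeaderboard_naive ranked player → Spec_climbingLeaderboard_naive ranked player (climbingLeaderboard_naive ranked player)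

-- ===== LEMMAS AND PROOFS =====

-- proof-side form of pvDAdj (run heads via dropWhile), with its handy induction scheme
def pvDAdjW : List Int → List Int
  | [] => []
  | x :: xs => x :: pvDAdjW (xs.dropWhile (fun y => y == x))
termination_by l => l.length
decreasing_by exact Nat.lt_succ_of_le (List.length_dropWhile_le _ _)

theorem pvDAdjAux_eq (l : List Int) : ∀ v : Int,
    pvDAdjAux v l = pvDAdjW (l.dropWhile (fun y => y == v)) := by
  induction l with
  | nil => intro v; simp [pvDAdjAux, pvDAdjW]
  | cons x xs ih =>
    intro v
    by_cases h : x = v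
    · subst h
      rw [List.dropWhile_cons_of_pos (by simp)]
      simp [pvDAdjAux, ih]
    · rw [List.dropWhile_cons_of_neg (by simpa using h), pvDAdjW]
      simp [pvDAdjAux, h, ih]

theorem pvDAdj_eq_W (l : List Int) : pvDAdj l = pvDAdjW l := by
  cases l with
  | nil => rw [pvDAdjW]; rfl
  | cons x xs => rw [pvDAdjW]; simp [pvDAdj, pvDAdjAux_eq]

-- number of "runs" of equal adjacent values: what A's curr_rank counts
def pvAdj (v : Int) : List Int → Int
  | [] => 0
  | x :: xs => (if x ≠ v then 1 else 0) + pvAdj x xs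

def pvRuns : List Int → Int
  | [] => 0
  | x :: xs => 1 + pvAdj x xs

theorem pv_innerA_some (p : Int) : ∀ (l : List Int) (curr v : Int),
    pvInnerA p l curr (some v) =
      (curr + pvAdj v (l.takeWhile (fun r => !decide (p ≥ r))),
       decide ((l.takeWhile (fun r => !decide (p ≥ r))).length < l.length)) := by
  intro l
  induction l with
  | nil => intro curr v; simp [pvInnerA, pvAdj]
  | cons r rest ih =>
    intro curr v
    by_cases hp : p ≥ r
    · simp [pvInnerA, hp, pvAdj]
    · by_cases hv : v = r
      · subst hv
        simp [pvInnerA, hp, ih, pvAdj]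
      · simp [pvInnerA, hp, Ne.symm hv, ih, pvAdj, hv]
        ring

theorem pv_innerA_start (p : Int) (l : List Int) :
    pvInnerA p l 1 none =
      (1 + pvRuns (l.takeWhile (fun r => !decide (p ≥ r))),
       decide ((l.takeWhile (fun r => !decide (p ≥ r))).length < l.length)) := by
  cases l with
  | nil => simp [pvInnerA, pvRuns]
  | cons r rest =>
    by_cases hp : p ≥ r
    · simp [pvInnerA, hp, pvRuns]
    · simp [pvInnerA, hp, pv_innerA_some, pvRuns]
      ring

theorem pv_adj_eq_runs_dropWhile (l : List Int) : ∀ v : Int,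
    pvAdj v l = pvRuns (l.dropWhile (fun y => y == v)) := by
  induction l with
  | nil => intro v; simp [pvAdj, pvRuns]
  | cons x xs ih =>
    intro v
    by_cases h : x = v
    · subst h
      simp [pvAdj, List.dropWhile_cons, ih]
    · simp [pvAdj, List.dropWhile_cons, h, pvRuns]

theorem pv_runs_eq_dAdj_length (l : List Int) : pvRuns l = ((pvDAdjW l).length : Int) := by
  induction l using pvDAdjW.induct with
  | case1 => simp [pvRuns, pvDAdjW]
  | case2 x xs ih =>
    rw [pvDAdjW]
    show 1 + pvAdj x xs = _
    rw [pv_adj_eq_runs_dropWhile, ih]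
    simp [Nat.cast_add]
    ring

theorem pv_mem_dAdj (y : Int) : ∀ l : List Int, y ∈ pvDAdjW l ↔ y ∈ l := by
  intro l
  induction l using pvDAdjW.induct with
  | case1 => simp [pvDAdjW]
  | case2 x xs ih =>
    rw [pvDAdjW]
    simp only [List.mem_cons, ih]
    constructor
    · rintro (h | h)
      · exact Or.inl h
      · exact Or.inr ((List.dropWhile_sublist _).mem h)
    · rintro (h | h)
      · exact Or.inl h
      · rw [← List.takeWhile_append_dropWhile (p := fun y => y == x) (l := xs)] at h
        rcases List.mem_append.mp h with h1 | h1
        · exact Or.inl (by simpa using List.mem_takeWhile_imp h1)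
        · exact Or.inr h1

theorem pv_drop_lt (x : Int) : ∀ xs : List Int, xs.Pairwise (fun a b => b ≤ a) →
    (∀ z ∈ xs, z ≤ x) → ∀ z ∈ xs.dropWhile (fun y => y == x), z < x := by
  intro xs
  induction xs with
  | nil => simp
  | cons y ys ih =>
    intro hpw hle z hz
    rcases List.pairwise_cons.mp hpw with ⟨h1, h2⟩
    by_cases hy : y = x
    · subst hy
      rw [List.dropWhile_cons_of_pos (by simp)] at hz
      exact ih h2 (fun z hz' => le_trans (h1 z hz') (hle y (by simp))) z hz
    · rw [List.dropWhile_cons_of_neg (by simpa using hy)] at hz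
      have hyx : y < x := lt_of_le_of_ne (hle y (by simp)) hy
      rcases List.mem_cons.mp hz with h | h
      · omega
      · exact lt_of_le_of_lt (h1 z h) hyx

theorem pv_dAdj_pairwise : ∀ l : List Int, l.Pairwise (fun a b => b ≤ a) →
    (pvDAdjW l).Pairwise (fun a b => b < a) := by
  intro l
  induction l using pvDAdjW.induct with
  | case1 => simp [pvDAdjW]
  | case2 x xs ih =>
    intro h
    rcases List.pairwise_cons.mp h with ⟨h1, h2⟩
    rw [pvDAdjW]
    refine List.pairwise_cons.mpr ⟨?_, ih (List.Pairwise.sublist (List.dropWhile_sublist _) h2)⟩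
    intro z hz
    exact pv_drop_lt x xs h2 h1 z ((pv_mem_dAdj z _).mp hz)

theorem pv_dropWhile_takeWhile (p : Int → Bool) (x : Int) (hx : p x = true) :
    ∀ xs : List Int, (xs.takeWhile p).dropWhile (fun y => y == x)
      = (xs.dropWhile (fun y => y == x)).takeWhile p := by
  intro xs
  induction xs with
  | nil => simp
  | cons y ys ih =>
    by_cases hy : y = x
    · subst hy
      rw [List.takeWhile_cons_of_pos hx, List.dropWhile_cons_of_pos (by simp),
        List.dropWhile_cons_of_pos (by simp), ih]
    · by_cases hp : p y = true
      · rw [List.takeWhile_cons_of_pos hp, List.dropWhile_cons_of_neg (by simpa using hy),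
          List.dropWhile_cons_of_neg (by simpa using hy), List.takeWhile_cons_of_pos hp]
      · rw [List.takeWhile_cons_of_neg (by simpa using hp),
          List.dropWhile_cons_of_neg (by simpa using hy),
          List.takeWhile_cons_of_neg (by simpa using hp)]
        simp

theorem pv_takeWhile_dAdj (p : Int → Bool) : ∀ l : List Int,
    (pvDAdjW l).takeWhile p = pvDAdjW (l.takeWhile p) := by
  intro l
  induction l using pvDAdjW.induct with
  | case1 => simp [pvDAdjW]
  | case2 x xs ih =>
    rw [pvDAdjW]
    by_cases hp : p x = true
    · rw [List.takeWhile_cons_of_pos hp, List.takeWhile_cons_of_pos hp, ih,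
        ← pv_dropWhile_takeWhile p x hp xs]
      rw [pvDAdjW]
    · rw [List.takeWhile_cons_of_neg (by simpa using hp),
        List.takeWhile_cons_of_neg (by simpa using hp), pvDAdjW]

theorem pv_takeWhile_eq_filter (p : Int) : ∀ E : List Int, E.Pairwise (fun a b => b < a) →
    E.takeWhile (fun r => !decide (p ≥ r)) = E.filter (fun r => !decide (p ≥ r)) := by
  intro E
  induction E with
  | nil => simp
  | cons a E ih =>
    intro h
    rcases List.pairwise_cons.mp h with ⟨h1, h2⟩
    by_cases hp : p ≥ a
    · rw [List.takeWhile_cons_of_neg (by simpa using hp),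
        List.filter_cons_of_neg (by simpa using hp)]
      rw [eq_comm, List.filter_eq_nil_iff]
      intro z hz
      have := h1 z hz
      simp; omega
    · rw [List.takeWhile_cons_of_pos (by simpa using hp),
        List.filter_cons_of_pos (by simpa using hp), ih h2]

def pvInv (L D : List Int) : Prop :=
  L ≠ [] ∧ L.Pairwise (fun a b => b ≤ a) ∧ D.Pairwise (fun a b => a < b) ∧
    (∀ x : Int, x ∈ D ↔ x ∈ L)

-- the dense rank A's run count computes equals the count of distinct scores above p,
-- read off any sorted-distinct D with the same members as L
theorem pv_rank_eq (p : Int) (L D : List Int) (h : pvInv L D) :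
    pvRuns (L.takeWhile (fun r => !decide (p ≥ r)))
      = ((D.filter (fun r => !decide (p ≥ r))).length : Int) := by
  obtain ⟨-, hL, hD, hmem⟩ := h
  have hE : (pvDAdjW L).Pairwise (fun a b => b < a) := pv_dAdj_pairwise L hL
  rw [pv_runs_eq_dAdj_length, ← pv_takeWhile_dAdj, pv_takeWhile_eq_filter p _ hE]
  congr 1
  have hnE : (pvDAdjW L).Nodup := hE.imp (fun h => h.ne')
  have hnD : D.Nodup := hD.imp (fun h => h.ne)
  refine List.Perm.length_eq ?_
  refine (List.perm_ext_iff_of_nodup (hnE.filter _) (hnD.filter _)).mpr ?_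
  intro a
  simp only [List.mem_filter, pv_mem_dAdj, hmem]

theorem pv_getD_mono (D : List Int) (hD : D.Pairwise (fun a b => a < b))
    (i j : Nat) (hij : i ≤ j) (hj : j < D.length) : D.getD i 0 ≤ D.getD j 0 := by
  have hi : i < D.length := lt_of_le_of_lt hij hj
  rw [List.getD_eq_getElem D 0 hi, List.getD_eq_getElem D 0 hj]
  rcases eq_or_lt_of_le hij with h | h
  · subst h; exact le_refl _
  · exact le_of_lt ((List.pairwise_iff_getElem.mp hD) i j hi hj h)

theorem pv_bisect_spec (D : List Int) (p : Int) (hD : D.Pairwise (fun a b => a < b)) :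
    ∀ (fuel lo hi : Nat), hi - lo ≤ fuel → lo ≤ hi → hi ≤ D.length →
      (∀ i, i < lo → D.getD i 0 ≤ p) → (∀ i, hi ≤ i → i < D.length → p < D.getD i 0) →
      lo ≤ pvBisect D p fuel lo hi ∧ pvBisect D p fuel lo hi ≤ D.length ∧
      (∀ i, i < pvBisect D p fuel lo hi → D.getD i 0 ≤ p) ∧
      (∀ i, pvBisect D p fuel lo hi ≤ i → i < D.length → p < D.getD i 0) := by
  intro fuel
  induction fuel with
  | zero =>
    intro lo hi hf hle hhi hlow hhigh
    rw [pvBisect]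
    exact ⟨le_refl _, hle.trans hhi, hlow, fun i h1 h2 => hhigh i (by omega) h2⟩
  | succ fuel ih =>
    intro lo hi hf hle hhi hlow hhigh
    rw [pvBisect]
    by_cases hlt : lo < hi
    · rw [if_pos hlt]
      dsimp only
      by_cases hle2 : D.getD ((lo + hi) / 2) 0 ≤ p
      · rw [if_pos hle2]
        refine (ih ((lo + hi) / 2 + 1) hi (by omega) (by omega) hhi ?_ hhigh).imp
          (fun h => by omega) (fun h => h)
        intro i hi1
        rcases Nat.lt_or_ge i lo with h | h
        · exact hlow i h
        · exact le_trans (pv_getD_mono D hD i ((lo + hi) / 2) (by omega) (by omega)) hle2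
      · rw [if_neg hle2]
        refine ih lo ((lo + hi) / 2) (by omega) (by omega) (by omega) hlow ?_
        intro i hi1 hi2
        exact lt_of_lt_of_le (by omega : p < D.getD ((lo + hi) / 2) 0)
          (pv_getD_mono D hD ((lo + hi) / 2) i hi1 hi2)
    · rw [if_neg hlt]
      exact ⟨le_refl _, hle.trans hhi, hlow, fun i h1 h2 => hhigh i (by omega) h2⟩

theorem pv_getLast_le : ∀ (L : List Int) (h : L ≠ []), L.Pairwise (fun a b => b ≤ a) →
    ∀ y ∈ L, L.getLast h ≤ y := by
  intro L
  induction L with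
  | nil => simp
  | cons a t ih =>
    intro h hpw y hy
    rcases List.pairwise_cons.mp hpw with ⟨h1, h2⟩
    cases t with
    | nil => simp at hy; subst hy; simp [List.getLast]
    | cons b t' =>
      rw [List.getLast_cons (by simp)]
      rcases List.mem_cons.mp hy with rfl | hy'
      · exact le_trans (ih (by simp) h2 b (by simp)) (h1 b (by simp))
      · exact ih (by simp) h2 y hy'

-- A's step appends exactly the dense rank computed from D (sorted board)
theorem pv_stepA_res (p : Int) (res L D : List Int) (h : pvInv L D) :
    (pvStepA (res, L) p).1
      = res ++ [1 + ((D.filter (fun r => !decide (p ≥ r))).length : Int)] := by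
  obtain ⟨hne, hL, hD, hmem⟩ := h
  have hcb := pv_innerA_start p L
  have hrank := pv_rank_eq p L D ⟨hne, hL, hD, hmem⟩
  set pred := fun r => !decide (p ≥ r) with hpred
  have hlast : PySem.List.pyGet? L (-1) = some (L.getLast hne) := by
    rw [PySem.List.pyGet?_neg_one, List.getLast?_eq_getLast ]
  by_cases hhit : (L.takeWhile pred).length < L.length
  · -- some element satisfies p ≥ r; the conditional append does not fire
    have hdne : L.dropWhile pred ≠ [] := by
      intro hd
      have := List.takeWhile_append_dropWhile (p := pred) (l := L)
      rw [hd, List.append_nil] at this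
      have := congrArg List.length this
      omega
    have hh0 : pred ((L.dropWhile pred).head hdne) = false := List.head_dropWhile_not pred hdne
    have hh0mem : (L.dropWhile pred).head hdne ∈ L :=
      (List.dropWhile_sublist _).mem (List.head_mem hdne)
    have hple : L.getLast hne ≤ p := by
      have h1 : L.getLast hne ≤ (L.dropWhile pred).head hdne :=
        pv_getLast_le L hne hL _ hh0mem
      have h2 : p ≥ (L.dropWhile pred).head hdne := by
        simpa [hpred] using hh0
      omega
    have hnotlt : ¬ p < L.getLast hne := by omega
    have hb : decide ((L.takeWhile pred).length < L.length) = true := by simpa using hhit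
    simp [pvStepA, hcb, hlast, hb, hnotlt, hrank]
  · -- no element ≤ p: the loop ran through; the conditional append fires
    have htw : L.takeWhile pred = L :=
      (List.takeWhile_prefix pred).eq_of_length (by
        have := (List.takeWhile_prefix pred (l := L)).length_le; omega)
    have hplast : p < L.getLast hne := by
      have : pred (L.getLast hne) = true := by
        have hmemtw : L.getLast hne ∈ L.takeWhile pred := by
          rw [htw]; exact List.getLast_mem hne
        exact List.mem_takeWhile_imp hmemtw
      simpa [hpred] using this
    have hb : decide ((L.takeWhile pred).length < L.length) = false := by simpa using hhit
    simp [pvStepA, hcb, hlast, hb, hplast, hrank]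

theorem pv_stepB_res (p : Int) (res D : List Int) (hD : D.Pairwise (fun a b => a < b)) :
    (pvStepB (res, D) p).1
      = res ++ [1 + ((D.filter (fun r => !decide (p ≥ r))).length : Int)] := by
  obtain ⟨-, hlol, hlow, hhigh⟩ := pv_bisect_spec D p hD D.length 0 D.length (by omega) (by omega) (le_refl _)
    (by omega) (by omega)
  set lo := pvBisect D p D.length 0 D.length with hlo
  have hcount : (D.filter (fun r => !decide (p ≥ r))).length = D.length - lo := by
    rw [← List.countP_eq_length_filter]
    conv_lhs => rw [← List.take_append_drop lo D]
    rw [List.countP_append]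
    have h1 : (D.take lo).countP (fun r => !decide (p ≥ r)) = 0 := by
      rw [List.countP_eq_zero]
      intro a ha
      rcases List.mem_iff_getElem.mp ha with ⟨i, hilt, hieq⟩
      have hi2 : i < lo := by have := List.length_take_le lo D; omega
      have := hlow i hi2
      rw [List.getD_eq_getElem D 0 (by have := List.length_take_le lo D; omega)] at this
      rw [← hieq, List.getElem_take]
      simp; omega
    have h2 : (D.drop lo).countP (fun r => !decide (p ≥ r)) = (D.drop lo).length := by
      rw [List.countP_eq_length]
      intro a ha
      rcases List.mem_iff_getElem.mp ha with ⟨i, hilt, hieq⟩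
      have hlen : (D.drop lo).length = D.length - lo := List.length_drop ..
      have := hhigh (lo + i) (by omega) (by omega)
      rw [List.getD_eq_getElem D 0 (by omega)] at this
      rw [← hieq, List.getElem_drop]
      simp; omega
    rw [h1, h2, List.length_drop]
    omega
  simp only [pvStepB, hcount]
  congr 2
  push_cast [hcount]
  omega

-- B's step on a sorted-distinct D: the new D is sorted-distinct with p added
theorem pv_stepB_D (p : Int) (res D : List Int) (hD : D.Pairwise (fun a b => a < b)) :
    (pvStepB (res, D) p).2.Pairwise (fun a b => a < b) ∧
      (∀ x : Int, x ∈ (pvStepB (res, D) p).2 ↔ x ∈ D ∨ x = p) := by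
  obtain ⟨-, hlol, hlow, hhigh⟩ := pv_bisect_spec D p hD D.length 0 D.length (by omega) (by omega) (le_refl _)
    (by omega) (by omega)
  set lo := pvBisect D p D.length 0 D.length with hlo
  constructor
  · simp only [pvStepB]
    by_cases hg : lo = 0 ∨ D.getD (lo - 1) 0 ≠ p
    · rw [if_pos hg, PySem.List.insert_natCast D lo p hlol]
      have hpnotin : p ∉ D := by
        intro hp
        rcases List.mem_iff_getElem.mp hp with ⟨j, hjlt, hjeq⟩
        have hjlo : j < lo := by
          by_contra hge
          have := hhigh j (by omega) hjlt
          rw [List.getD_eq_getElem D 0 hjlt] at this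
          omega
        have hlo0 : lo ≠ 0 := by omega
        have h1 : D.getD (lo - 1) 0 ≤ p := hlow (lo - 1) (by omega)
        have h2 : D.getD j 0 ≤ D.getD (lo - 1) 0 :=
          pv_getD_mono D hD j (lo - 1) (by omega) (by omega)
        rw [List.getD_eq_getElem D 0 hjlt] at h2
        rcases hg with h | h
        · omega
        · apply h
          rw [List.getD_eq_getElem D 0 (by omega)] at h1 h2 ⊢
          omega
      have htake : ∀ a ∈ D.take lo, a < p := by
        intro a ha
        rcases List.mem_iff_getElem.mp ha with ⟨i, hilt, hieq⟩
        have hi2 : i < lo := by have := List.length_take_le lo D; omega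
        have := hlow i hi2
        rw [List.getD_eq_getElem D 0 (by have := List.length_take_le lo D; omega)] at this
        rw [← hieq, List.getElem_take]
        have hne2 : D[i] ≠ p := fun hh => hpnotin (hh ▸ List.getElem_mem _)
        omega
      have hdrop : ∀ b ∈ D.drop lo, p < b := by
        intro b hb
        rcases List.mem_iff_getElem.mp hb with ⟨i, hilt, hieq⟩
        have hlen : (D.drop lo).length = D.length - lo := List.length_drop ..
        have := hhigh (lo + i) (by omega) (by omega)
        rw [List.getD_eq_getElem D 0 (by omega)] at this
        rw [← hieq, List.getElem_drop]
        omega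
      refine List.pairwise_append.mpr ⟨hD.sublist (List.take_sublist lo D), ?_, ?_⟩
      · refine List.pairwise_cons.mpr ⟨hdrop, hD.sublist (List.drop_sublist lo D)⟩
      · intro a ha b hb
        rcases List.mem_cons.mp hb with rfl | hb'
        · exact htake a ha
        · exact lt_trans (htake a ha) (hdrop b hb')
    · rw [if_neg hg]; exact hD
  · intro x
    simp only [pvStepB]
    by_cases hg : lo = 0 ∨ D.getD (lo - 1) 0 ≠ p
    · rw [if_pos hg, PySem.List.insert_natCast D lo p hlol]
      conv_rhs => rw [← List.take_append_drop lo D]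
      simp only [List.mem_append, List.mem_cons]
      tauto
    · rw [if_neg hg]
      push_neg at hg
      obtain ⟨hlo0, hgetd⟩ := hg
      have hplomem : p ∈ D := by
        rw [← hgetd, List.getD_eq_getElem D 0 (by omega)]
        exact List.getElem_mem _
      constructor
      · exact fun hx => Or.inl hx
      · rintro (hx | rfl)
        · exact hx
        · exact hplomem

-- one step keeps the invariant; needs only L ≠ [], D sorted-distinct, same members
theorem pv_inv_next (p : Int) (res res' L D : List Int) (hne : L ≠ [])
    (hD : D.Pairwise (fun a b => a < b)) (hmem : ∀ x : Int, x ∈ D ↔ x ∈ L) :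
    pvInv (pvStepA (res, L) p).2 (pvStepB (res', D) p).2 := by
  obtain ⟨hD', hmem'⟩ := pv_stepB_D p res' D hD
  have hA2 : (pvStepA (res, L) p).2 = PySem.List.sorted (L ++ [p]) (fun x => x) true := rfl
  refine ⟨?_, ?_, hD', ?_⟩
  · rw [hA2]
    simp [PySem.List.sorted_eq_nil_iff]
  · rw [hA2]
    exact PySem.List.sorted_pairwise_rev (L ++ [p]) (fun x => x)
  · intro x
    rw [hA2, hmem' x, PySem.List.mem_sorted]
    simp only [List.mem_append, List.mem_singleton, hmem x]

theorem pv_step_eq (p : Int) (res L D : List Int) (h : pvInv L D) :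
    (pvStepA (res, L) p).1 = (pvStepB (res, D) p).1 ∧
      pvInv (pvStepA (res, L) p).2 (pvStepB (res, D) p).2 := by
  refine ⟨?_, pv_inv_next p res res L D h.1 h.2.2.1 h.2.2.2⟩
  rw [pv_stepA_res p res L D h, pv_stepB_res p res D h.2.2.1]

theorem pv_fold_eq : ∀ (rest res L D : List Int), pvInv L D →
    (rest.foldl pvStepA (res, L)).1 = (rest.foldl pvStepB (res, D)).1 := by
  intro rest
  induction rest with
  | nil => intro res L D h; rfl
  | cons q qs ih =>
    intro res L D h
    obtain ⟨h1, hinv⟩ := pv_step_eq q res L D h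
    rw [List.foldl_cons, List.foldl_cons,
      ← Prod.mk.eta (p := pvStepA (res, L) q), ← Prod.mk.eta (p := pvStepB (res, D) q), h1]
    exact ih (pvStepB (res, D) q).1 (pvStepA (res, L) q).2 (pvStepB (res, D) q).2 hinv

-- D0 = sorted(set(ranked)): sorted-distinct with ranked's members
theorem pv_D0_pairwise (ranked : List Int) :
    (PySem.List.sorted (PySem.Set.ofList ranked) (fun x => x) false).Pairwise (fun a b => a < b) :=
  PySem.List.sorted_ofList_pairwise_lt ranked

theorem pv_D0_mem (ranked : List Int) (x : Int) :
    x ∈ PySem.List.sorted (PySem.Set.ofList ranked) (fun x => x) false ↔ x ∈ ranked := by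
  rw [PySem.List.mem_sorted, PySem.Set.mem_ofList]

-- Pre_'s run-head condition turns A's run count into the distinct count from D0
theorem pv_rank_eq_pre (p0 : Int) (ranked : List Int)
    (hfil : ranked.takeWhile (fun r => !decide (p0 ≥ r))
      = ranked.filter (fun r => !decide (p0 ≥ r)))
    (hnd : (pvDAdjW (ranked.takeWhile (fun r => !decide (p0 ≥ r)))).Nodup) :
    pvRuns (ranked.takeWhile (fun r => !decide (p0 ≥ r)))
      = (((PySem.List.sorted (PySem.Set.ofList ranked) (fun x => x) false).filter
          (fun r => !decide (p0 ≥ r))).length : Int) := by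
  set pred := fun r => !decide (p0 ≥ r) with hpred
  set D0 := PySem.List.sorted (PySem.Set.ofList ranked) (fun x => x) false with hD0
  rw [pv_runs_eq_dAdj_length]
  congr 1
  have hnD : (D0.filter pred).Nodup :=
    ((pv_D0_pairwise ranked).imp (fun h => h.ne)).filter _
  refine List.Perm.length_eq ?_
  refine (List.perm_ext_iff_of_nodup hnd hnD).mpr ?_
  intro a
  rw [List.mem_filter, pv_mem_dAdj, pv_D0_mem, hfil, List.mem_filter]

-- A's first step on a Pre_-shaped board: exactly one appended rank, the dense one
theorem pv_first_A (ranked : List Int) (p0 : Int) (hne : ranked ≠ [])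
    (hfil : ranked.takeWhile (fun r => !decide (p0 ≥ r))
      = ranked.filter (fun r => !decide (p0 ≥ r))) :
    (pvStepA ([], ranked) p0).1 = [1 + pvRuns (ranked.takeWhile (fun r => !decide (p0 ≥ r)))] := by
  have hcb := pv_innerA_start p0 ranked
  set pred := fun r => !decide (p0 ≥ r) with hpred
  have hlast : PySem.List.pyGet? ranked (-1) = some (ranked.getLast hne) := by
    rw [PySem.List.pyGet?_neg_one, List.getLast?_eq_getLast]
  by_cases hhit : (ranked.takeWhile pred).length < ranked.length
  · -- the scan broke: the trailing append must not fire, since all scores > p0 lead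
    have hdne : ranked.dropWhile pred ≠ [] := by
      intro hd
      have := List.takeWhile_append_dropWhile (p := pred) (l := ranked)
      rw [hd, List.append_nil] at this
      have := congrArg List.length this
      omega
    have hsplit := List.takeWhile_append_dropWhile (p := pred) (l := ranked)
    have hfil2 : (ranked.dropWhile pred).filter pred = [] := by
      have h1 : (ranked.takeWhile pred).filter pred = ranked.takeWhile pred :=
        List.filter_eq_self.mpr (fun a ha => List.mem_takeWhile_imp ha)
      have h2 : ranked.filter pred
          = (ranked.takeWhile pred).filter pred ++ (ranked.dropWhile pred).filter pred := by
        conv_lhs => rw [← hsplit]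
        exact List.filter_append ..
      rw [h1, ← hfil] at h2
      have := congrArg List.length h2
      simp only [List.length_append] at this
      exact List.eq_nil_of_length_eq_zero (by omega)
    have h5 : ranked.getLast? = (ranked.dropWhile pred).getLast? := by
      conv_lhs => rw [← hsplit]
      exact List.getLast?_append_of_ne_nil _ hdne
    have hlastmem : ranked.getLast hne ∈ ranked.dropWhile pred := by
      refine List.mem_of_getLast? (l := ranked.dropWhile pred) (a := ranked.getLast hne) ?_
      rw [← h5, List.getLast?_eq_getLast]
    have hpfalse : pred (ranked.getLast hne) = false := by
      by_contra hcon
      have : ranked.getLast hne ∈ (ranked.dropWhile pred).filter pred :=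
        List.mem_filter.mpr ⟨hlastmem, by simpa using hcon⟩
      rw [hfil2] at this
      simp at this
    have hnotlt : ¬ p0 < ranked.getLast hne := by
      have : ¬ (!decide (p0 ≥ ranked.getLast hne)) = true := by
        rw [hpred] at hpfalse; simp [hpfalse]
      simp at this
      omega
    have hb : decide ((ranked.takeWhile pred).length < ranked.length) = true := by simpa using hhit
    simp [pvStepA, hcb, hlast, hb, hnotlt]
  · -- the scan ran through: the trailing append fires (p0 below every score)
    have htw : ranked.takeWhile pred = ranked :=
      (List.takeWhile_prefix pred).eq_of_length (by
        have := (List.takeWhile_prefix pred (l := ranked)).length_le; omega)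
    have hplast : p0 < ranked.getLast hne := by
      have : pred (ranked.getLast hne) = true := by
        have hmemtw : ranked.getLast hne ∈ ranked.takeWhile pred := by
          rw [htw]; exact List.getLast_mem hne
        exact List.mem_takeWhile_imp hmemtw
      rw [hpred] at this
      simp at this
      omega
    have hb : decide ((ranked.takeWhile pred).length < ranked.length) = false := by
      simpa using hhit
    simp [pvStepA, hcb, hlast, hb, hplast]

theorem pv_main (ranked player : List Int)
    (hpre : Pre_climbingLeaderboard_naive ranked player) :
    climbingLeaderboard_naive ranked player = climbingLeaderboard_naive_alt ranked player := by
  cases player with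
  | nil => rfl
  | cons p0 rest =>
    rcases hpre with hnil | ⟨hne, hfil, hnd⟩
    · exact absurd hnil (by simp)
    have hhead : (p0 :: rest).headI = p0 := rfl
    rw [hhead] at hfil hnd
    rw [pvDAdj_eq_W] at hnd
    set D0 := PySem.List.sorted (PySem.Set.ofList ranked) (fun x => x) false with hD0
    show ((p0 :: rest).foldl pvStepA ([], ranked)).1 = ((p0 :: rest).foldl pvStepB ([], D0)).1
    rw [List.foldl_cons, List.foldl_cons,
      ← Prod.mk.eta (p := pvStepA ([], ranked) p0), ← Prod.mk.eta (p := pvStepB ([], D0) p0)]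
    have hres1 : (pvStepA ([], ranked) p0).1 = (pvStepB ([], D0) p0).1 := by
      rw [pv_first_A ranked p0 hne hfil, pv_stepB_res p0 [] D0 (pv_D0_pairwise ranked),
        pv_rank_eq_pre p0 ranked hfil hnd]
      rfl
    rw [hres1]
    exact pv_fold_eq rest _ _ _
      (pv_inv_next p0 [] [] ranked D0 hne (pv_D0_pairwise ranked) (pv_D0_mem ranked))

-- ===== VERDICT (by name: the statement is the Claim_ definition above) =====
theorem climbingLeaderboard_naive_spec : Claim_equal_climbingLeaderboard_naive := by
  intro ranked player _ hpre
  unfold Spec_climbingLeaderboard_naive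
  exact pv_main ranked player hpre
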